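-- pv_equiv track=rewrite | github.com/karanm6505/Agentic | generate_dependency_graph.py | categorize_subject
-- ===== SOURCE A (Python) =====
-- def categorize_subject(subject_name, subject_focus=""):
--     """Categorize subjects for color coding"""
--     subject_lower = subject_name.lower()
--     focus_lower = subject_focus.lower()
--
--     # Math-related courses
--     if any(term in subject_lower for term in ['calculus', 'linear algebra', 'discrete mathematics', 'probability', 'statistics']):
--         return 'math'
--
--     # Programming courses
--     elif any(term in subject_lower for term in ['programming', 'data structures', 'algorithms', 'software engineering', 'database']):
--         return 'programming'
--
--     # AI/ML courses
--     elif any(term in subject_lower for term in ['machine learning', 'artificial intelligence', 'deep learning', 'neural', 'nlp', 'computer vision', 'reinforcement']):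
--         return 'ai_ml'
--
--     # Project/Practical courses
--     elif any(term in subject_lower for term in ['project', 'research', 'thesis', 'capstone', 'entrepreneurship']):
--         return 'project'
--
--     # Theoretical courses
--     elif any(term in subject_lower for term in ['theory', 'ethics', 'reasoning', 'planning']):
--         return 'theory'
--
--     # Default to elective
--     else:
--         return 'elective'
-- ===== SOURCE B (Python) =====
-- _ORDER = ('math', 'programming', 'ai_ml', 'project', 'theory', 'elective')
--
-- _KEYWORD_RANK = {
--     'calculus': 0, 'linear algebra': 0, 'discrete mathematics': 0, 'probability': 0, 'statistics': 0,
--     'programming': 1, 'data structures': 1, 'algorithms': 1, 'software engineering': 1, 'database': 1,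
--     'machine learning': 2, 'artificial intelligence': 2, 'deep learning': 2, 'neural': 2, 'nlp': 2,
--     'computer vision': 2, 'reinforcement': 2,
--     'project': 3, 'research': 3, 'thesis': 3, 'capstone': 3, 'entrepreneurship': 3,
--     'theory': 4, 'ethics': 4, 'reasoning': 4, 'planning': 4,
-- }
--
-- def categorize_subject(subject_name, subject_focus=""):
--     """Categorize subjects for color coding: best (lowest) priority rank over all matched keywords."""
--     subject_lower = subject_name.lower()
--     subject_focus.lower()
--     best = 5
--     for keyword, rank in _KEYWORD_RANK.items():
--         if keyword in subject_lower and rank < best: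
--             best = rank
--     return _ORDER[best]
-- ===== Notes on version B (the rewrite author's own statement) =====
-- stated objective: alternative
-- what changed: Instead of five ordered if/elif first-match branches, B uses a flat keyword-to-priority-rank map and one min-reduction pass over all keywords (no early exit, no per-category grouping), then indexes the category name by the best rank found.
import Mathlib
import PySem

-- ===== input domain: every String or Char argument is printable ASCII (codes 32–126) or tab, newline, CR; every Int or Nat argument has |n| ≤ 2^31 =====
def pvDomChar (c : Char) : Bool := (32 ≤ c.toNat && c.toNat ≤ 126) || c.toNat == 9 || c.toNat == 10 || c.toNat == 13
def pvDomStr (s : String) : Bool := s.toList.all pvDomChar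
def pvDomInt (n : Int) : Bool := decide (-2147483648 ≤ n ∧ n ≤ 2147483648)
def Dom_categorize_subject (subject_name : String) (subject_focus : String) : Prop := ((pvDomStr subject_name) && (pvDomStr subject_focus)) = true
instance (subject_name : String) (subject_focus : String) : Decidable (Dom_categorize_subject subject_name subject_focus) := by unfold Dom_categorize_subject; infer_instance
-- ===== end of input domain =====

-- B replaces A's five ordered if/elif branches by a flat keyword→priority-rank map and one
-- min-reduction pass over all keywords, then indexes the category by the best rank (objective: alternative; same cost).


-- ===== PORT A =====
def categorize_subject (subject_name : String) (subject_focus : String) : String :=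
  let subject_lower := PySem.Str.lower subject_name
  let _focus_lower := PySem.Str.lower subject_focus
  if ["calculus", "linear algebra", "discrete mathematics", "probability", "statistics"].any
        (fun term => PySem.Str.isIn term subject_lower) then "math"
  else if ["programming", "data structures", "algorithms", "software engineering", "database"].any
        (fun term => PySem.Str.isIn term subject_lower) then "programming"
  else if ["machine learning", "artificial intelligence", "deep learning", "neural", "nlp", "computer vision", "reinforcement"].any
        (fun term => PySem.Str.isIn term subject_lower) then "ai_ml"
  else if ["project", "research", "thesis", "capstone", "entrepreneurship"].any
        (fun term => PySem.Str.isIn term subject_lower) then "project"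
  else if ["theory", "ethics", "reasoning", "planning"].any
        (fun term => PySem.Str.isIn term subject_lower) then "theory"
  else "elective"

-- ===== PORT B =====
-- Source B's _ORDER tuple and flat _KEYWORD_RANK dict (dict → association list, insertion order)
def pvOrder : List String := ["math", "programming", "ai_ml", "project", "theory", "elective"]

def pvKeywordRank : List (String × Int) :=
  [("calculus", 0), ("linear algebra", 0), ("discrete mathematics", 0), ("probability", 0), ("statistics", 0),
   ("programming", 1), ("data structures", 1), ("algorithms", 1), ("software engineering", 1), ("database", 1),
   ("machine learning", 2), ("artificial intelligence", 2), ("deep learning", 2), ("neural", 2), ("nlp", 2),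
   ("computer vision", 2), ("reinforcement", 2),
   ("project", 3), ("research", 3), ("thesis", 3), ("capstone", 3), ("entrepreneurship", 3),
   ("theory", 4), ("ethics", 4), ("reasoning", 4), ("planning", 4)]

def categorize_subject_alt (subject_name : String) (subject_focus : String) : String :=
  let subject_lower := PySem.Str.lower subject_name
  let _ := PySem.Str.lower subject_focus
  let best := pvKeywordRank.foldl
    (fun best p => if PySem.Str.isIn p.1 subject_lower && decide (p.2 < best) then p.2 else best) 5
  (PySem.List.pyGet? pvOrder best).getD ""

-- ===== PRECONDITION & SPEC =====
def Spec_categorize_subject (subject_name : String) (subject_focus : String) (out : String) : Prop := out = categorize_subject_alt subject_name subject_focus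
instance (subject_name : String) (subject_focus : String) (out : String) : Decidable (Spec_categorize_subject subject_name subject_focus out) := by unfold Spec_categorize_subject; infer_instance

-- ===== CLAIM (what is proved, stated in full; the proofs are below) =====
def Claim_equal_categorize_subject : Prop := ∀ (subject_name : String) (subject_focus : String), Dom_categorize_subject subject_name subject_focus → Spec_categorize_subject subject_name subject_focus (categorize_subject subject_name subject_focus)

-- ===== LEMMAS AND PROOFS =====

-- folding B's min-reduction over one constant-rank chunk of keywords equals one 'any' test
theorem pvChunk (q : String → Bool) (r : Int) (ts : List String) (b : Int) :
    List.foldl (fun best p => if q p.1 && decide (p.2 < best) then p.2 else best) b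
      (ts.map (fun t => (t, r)))
    = if ts.any q && decide (r < b) then r else b := by
  induction ts generalizing b with
  | nil => simp
  | cons t ts ih =>
    simp only [List.map_cons, List.foldl_cons, List.any_cons, ih]
    rcases Bool.eq_false_or_eq_true (q t) with h | h <;> by_cases h2 : r < b <;>
      simp [h, h2]

-- the flat map is the five constant-rank chunks in priority order
theorem pvFlat : pvKeywordRank =
    (["calculus", "linear algebra", "discrete mathematics", "probability", "statistics"].map (fun t => (t, (0 : Int))))
    ++ (["programming", "data structures", "algorithms", "software engineering", "database"].map (fun t => (t, (1 : Int))))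
    ++ (["machine learning", "artificial intelligence", "deep learning", "neural", "nlp", "computer vision", "reinforcement"].map (fun t => (t, (2 : Int))))
    ++ (["project", "research", "thesis", "capstone", "entrepreneurship"].map (fun t => (t, (3 : Int))))
    ++ (["theory", "ethics", "reasoning", "planning"].map (fun t => (t, (4 : Int)))) := rfl

-- ===== VERDICT (by name: the statement is the Claim_ definition above) =====
theorem categorize_subject_spec : Claim_equal_categorize_subject := by
  intro subject_name subject_focus _
  unfold Spec_categorize_subject categorize_subject categorize_subject_alt
  rw [pvFlat]
  simp only [List.foldl_append]
  rw [pvChunk (fun t => PySem.Str.isIn t (PySem.Str.lower subject_name)),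
     pvChunk (fun t => PySem.Str.isIn t (PySem.Str.lower subject_name)),
     pvChunk (fun t => PySem.Str.isIn t (PySem.Str.lower subject_name)),
     pvChunk (fun t => PySem.Str.isIn t (PySem.Str.lower subject_name)),
     pvChunk (fun t => PySem.Str.isIn t (PySem.Str.lower subject_name))]
  generalize (["calculus", "linear algebra", "discrete mathematics", "probability", "statistics"].any
      (fun t => PySem.Str.isIn t (PySem.Str.lower subject_name))) = b1
  generalize (["programming", "data structures", "algorithms", "software engineering", "database"].any
      (fun t => PySem.Str.isIn t (PySem.Str.lower subject_name))) = b2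
  generalize (["machine learning", "artificial intelligence", "deep learning", "neural", "nlp", "computer vision", "reinforcement"].any
      (fun t => PySem.Str.isIn t (PySem.Str.lower subject_name))) = b3
  generalize (["project", "research", "thesis", "capstone", "entrepreneurship"].any
      (fun t => PySem.Str.isIn t (PySem.Str.lower subject_name))) = b4
  generalize (["theory", "ethics", "reasoning", "planning"].any
      (fun t => PySem.Str.isIn t (PySem.Str.lower subject_name))) = b5
  cases b1 <;> cases b2 <;> cases b3 <;> cases b4 <;> cases b5 <;> decide
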